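-- pv_equiv track=rewrite | github.com/rkenmi/algorithms | graphs/compute_enclosed.py | compute_enclosed
-- ===== SOURCE A (Python) =====
-- def compute_enclosed(A):
--     from collections import deque
--     n = len(A)  # vertical boundaries
--     m = len(A[0])  # horizontal boundaries
--
--     q = deque(
--         [(j, k) for i in range(0, n) for j, k in ((0, i), (m-1, i))] +  # vertical boundaries
--         [(j, k) for i in range(0, m) for j, k in ((i, 0), (i, n-1))] # horizontal boundaries
--     )
--
--     while q:
--         x, y = q.popleft()
--
--         if x >= 0 and x < m and y >= 0 and y < n and A[y][x] == 'W':
--             A[y][x] = 'Traversed'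
--
--             for d in ((0, 1), (1, 0), (-1, 0), (0, -1)):
--                 q.append((x + d[0], y + d[1]))
--
--     A[:] = [['W' if e == 'Traversed' else 'B' for e in row] for row in A]
--     return A
-- ===== SOURCE B (Python) =====
-- def compute_enclosed(A):
--     n = len(A)
--     m = len(A[0])
--
--     # scanline flood fill from the border: expand whole horizontal runs of water,
--     # marking them 'Traversed' in place, and seed the rows above and below
--     stack = []
--     for y in range(n):
--         stack.append((0, y))
--         stack.append((m - 1, y))
--     for x in range(m):
--         stack.append((x, 0))
--         stack.append((x, n - 1))
--
--     while stack:
--         x, y = stack.pop()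
--         if 0 <= y < n and 0 <= x < m and A[y][x] == 'W':
--             l = x
--             while l > 0 and A[y][l - 1] == 'W':
--                 l -= 1
--             r = x
--             while r < m - 1 and A[y][r + 1] == 'W':
--                 r += 1
--             for i in range(l, r + 1):
--                 A[y][i] = 'Traversed'
--                 stack.append((i, y - 1))
--                 stack.append((i, y + 1))
--
--     A[:] = [['W' if e == 'Traversed' else 'B' for e in row] for row in A]
--     return A
-- ===== Notes on version B (the rewrite author's own statement) =====
-- stated objective: alternative
-- what changed: Replaces A's per-cell BFS over a deque (blind 4-neighbour enqueue, bounds checked at pop) by a scanline flood fill: a stack of seeds where each popped water cell is expanded to its whole horizontal run, the run is marked in place and only the cells above and below the run are pushed as new seeds.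
import Mathlib
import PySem

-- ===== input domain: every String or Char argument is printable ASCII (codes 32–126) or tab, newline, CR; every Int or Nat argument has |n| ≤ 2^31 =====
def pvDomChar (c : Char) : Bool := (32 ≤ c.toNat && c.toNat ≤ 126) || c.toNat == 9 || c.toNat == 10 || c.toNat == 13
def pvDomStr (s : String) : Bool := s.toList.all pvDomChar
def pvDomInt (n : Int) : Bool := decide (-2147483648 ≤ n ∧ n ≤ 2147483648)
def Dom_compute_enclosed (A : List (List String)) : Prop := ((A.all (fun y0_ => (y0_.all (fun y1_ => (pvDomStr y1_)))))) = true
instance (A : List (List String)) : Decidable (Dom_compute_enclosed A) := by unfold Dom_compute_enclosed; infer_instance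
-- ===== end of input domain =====

-- B replaces A's per-cell BFS over a deque by a scanline flood fill: popped seeds are expanded
-- to whole horizontal water runs, marked in place, with only the rows above/below reseeded
-- (objective: alternative algorithm, not faster). Both Pythons mutate A in place via
-- `A[:] = …`; the equivalence proved here is about the RETURN value.

-- ===== PORT A =====
-- A[y][x] (read after Python's own 0 ≤ x < m, 0 ≤ y < n guard, or on in-range scan indices)
def pvCell (g : List (List String)) (y x : Int) : String := (g.getD y.toNat []).getD x.toNat ""

-- A[y][x] = 'Traversed'
def pvSetCell (g : List (List String)) (y x : Int) : List (List String) :=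
  g.set y.toNat ((g.getD y.toNat []).set x.toNat "Traversed")

-- number of 'W' cells still on the grid (fuel bound for the while loop: every productive
-- iteration turns one 'W' into 'Traversed', every other iteration shortens the queue)
def pvCountW (g : List (List String)) : Nat := (g.map (fun r => r.count "W")).sum

-- the initial deque of border coordinates
def pvQ0 (n m : Int) : List (Int × Int) :=
  (PySem.List.pyRange 0 n 1).flatMap (fun i => [((0 : Int), i), (m - 1, i)]) ++
  (PySem.List.pyRange 0 m 1).flatMap (fun i => [(i, (0 : Int)), (i, n - 1)])

-- the while loop (fuel only makes it total; `compute_enclosed` passes a provably sufficient amount)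
def pvBfs (n m : Int) : Nat → List (List String) → List (Int × Int) → List (List String)
  | 0, g, _ => g
  | _ + 1, g, [] => g
  | fuel + 1, g, (x, y) :: rest =>
    if 0 ≤ x ∧ x < m ∧ 0 ≤ y ∧ y < n ∧ pvCell g y x = "W" then
      pvBfs n m fuel (pvSetCell g y x)
        (rest ++ [(x, y + 1), (x + 1, y), (x - 1, y), (x, y - 1)])
    else
      pvBfs n m fuel g rest

def compute_enclosed (A : List (List String)) : List (List String) :=
  let n : Int := A.length
  let m : Int := (A.getD 0 []).length
  let q0 := pvQ0 n m
  let g := pvBfs n m (5 * pvCountW A + q0.length + 1) A q0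
  g.map (fun row => row.map (fun e => if e = "Traversed" then "W" else "B"))

-- ===== PORT B =====
-- B: scanline flood fill — a stack of seeds; each popped water cell is expanded to its whole
-- horizontal run, the run is marked 'Traversed' in place, and the cells above and below the run
-- are pushed as new seeds; finally the grid is recoloured from the marks (same recolour pass).
-- Python's `stack.append`/`stack.pop()` (end of list) are modelled with `::`/head on a list
-- kept in reversed order, so pops happen in Python's order.
def pvStack0 (n m : Int) : List (Int × Int) :=
  ((PySem.List.pyRange 0 n 1).flatMap (fun y => [((0 : Int), y), (m - 1, y)]) ++
   (PySem.List.pyRange 0 m 1).flatMap (fun x => [(x, (0 : Int)), (x, n - 1)])).reverse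

-- while l > 0 and A[y][l-1] == 'W': l -= 1   (fuel only makes it total; x.toNat is enough)
def pvWalkL (g : List (List String)) (y : Int) : Nat → Int → Int
  | 0, l => l
  | f + 1, l => if 0 < l ∧ pvCell g y (l - 1) = "W" then pvWalkL g y f (l - 1) else l

-- while r < m-1 and A[y][r+1] == 'W': r += 1   (fuel (m-1-x).toNat is enough)
def pvWalkR (g : List (List String)) (m y : Int) : Nat → Int → Int
  | 0, r => r
  | f + 1, r => if r < m - 1 ∧ pvCell g y (r + 1) = "W" then pvWalkR g m y f (r + 1) else r

-- for i in range(l, r+1): A[y][i] = 'Traversed'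
def pvMarkSpan (g : List (List String)) (y l r : Int) : List (List String) :=
  (PySem.List.pyRange l (r + 1) 1).foldl (fun h i => pvSetCell h y i) g

-- the seeds pushed while marking the span, in reversed (pop) order
def pvPushes (y l r : Int) : List (Int × Int) :=
  ((PySem.List.pyRange l (r + 1) 1).flatMap (fun i => [(i, y - 1), (i, y + 1)])).reverse

-- the while loop over the stack (fuel only makes it total)
def pvScan (n m : Int) : Nat → List (List String) → List (Int × Int) → List (List String)
  | 0, g, _ => g
  | _ + 1, g, [] => g
  | fuel + 1, g, (x, y) :: rest =>
    if 0 ≤ y ∧ y < n ∧ 0 ≤ x ∧ x < m ∧ pvCell g y x = "W" then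
      pvScan n m fuel
        (pvMarkSpan g y (pvWalkL g y x.toNat x) (pvWalkR g m y (m - 1 - x).toNat x))
        (pvPushes y (pvWalkL g y x.toNat x) (pvWalkR g m y (m - 1 - x).toNat x) ++ rest)
    else pvScan n m fuel g rest

def compute_enclosed_alt (A : List (List String)) : List (List String) :=
  let n : Int := A.length
  let m : Int := (A.getD 0 []).length
  let g := pvScan n m (3 * pvCountW A + (pvStack0 n m).length + 1) A (pvStack0 n m)
  g.map (fun row => row.map (fun e => if e = "Traversed" then "W" else "B"))

-- ===== PRECONDITION & SPEC =====
-- Pre_ excludes exactly the inputs where Python A raises IndexError: the empty list (len(A[0]))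
-- and grids with a row shorter than the first row (the BFS reads A[y][m-1] on every row).
def Pre_compute_enclosed (A : List (List String)) : Prop :=
  A ≠ [] ∧ ∀ row ∈ A, (A.getD 0 []).length ≤ row.length

instance (A : List (List String)) : Decidable (Pre_compute_enclosed A) := by
  unfold Pre_compute_enclosed; infer_instance

def pvWitness_compute_enclosed : List (List String) := [["W", "B"], ["B", "W"]]

def Spec_compute_enclosed (A : List (List String)) (out : List (List String)) : Prop :=
  out = compute_enclosed_alt A

instance (A : List (List String)) (out : List (List String)) :
    Decidable (Spec_compute_enclosed A out) := by unfold Spec_compute_enclosed; infer_instance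

-- ===== CLAIM (what is proved, stated in full; the proofs are below) =====
def Claim_equal_compute_enclosed : Prop :=
  ∀ (A : List (List String)), Dom_compute_enclosed A → Pre_compute_enclosed A →
    Spec_compute_enclosed A (compute_enclosed A)

-- ===== LEMMAS AND PROOFS =====

-- ---- basic cell/grid lemmas (A-side) ----

lemma pvCell_W_bounds {g : List (List String)} {y x : Int} (h : pvCell g y x = "W") :
    y.toNat < g.length ∧ x.toNat < (g.getD y.toNat []).length := by
  unfold pvCell at h
  have hy : y.toNat < g.length := by
    by_contra hb
    rw [List.getD_eq_default g _ (Nat.le_of_not_lt hb)] at h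
    simp at h
  refine ⟨hy, ?_⟩
  by_contra hb
  rw [List.getD_eq_default _ _ (Nat.le_of_not_lt hb)] at h
  simp at h

lemma length_pvSetCell (g : List (List String)) (y x : Int) :
    (pvSetCell g y x).length = g.length := by
  unfold pvSetCell; exact List.length_set ..

lemma rowLen_pvSetCell (g : List (List String)) (y x : Int) (i : Nat) :
    ((pvSetCell g y x).getD i []).length = (g.getD i []).length := by
  unfold pvSetCell
  simp only [List.getD_eq_getElem?_getD]
  rcases eq_or_ne y.toNat i with rfl | hne
  · by_cases hlt : y.toNat < g.length
    · rw [List.getElem?_set_self (by simpa using hlt), List.getElem?_eq_getElem hlt]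
      simp
    · rw [List.set_eq_of_length_le (Nat.le_of_not_lt hlt)]
  · rw [List.getElem?_set_ne hne]

lemma pvCell_set {g : List (List String)} {y0 x0 : Int} (h : pvCell g y0 x0 = "W")
    (y x : Int) :
    pvCell (pvSetCell g y0 x0) y x =
      if y.toNat = y0.toNat ∧ x.toNat = x0.toNat then "Traversed" else pvCell g y x := by
  obtain ⟨hy0, hx0⟩ := pvCell_W_bounds h
  have hxrow : x0.toNat < g[y0.toNat].length := by
    rw [← List.getD_eq_getElem g [] hy0]; exact hx0
  unfold pvCell pvSetCell
  simp only [List.getD_eq_getElem?_getD]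
  rcases eq_or_ne y.toNat y0.toNat with hy | hy
  · rw [hy, List.getElem?_set_self (by simpa using hy0), List.getElem?_eq_getElem hy0]
    simp only [Option.getD_some]
    rcases eq_or_ne x.toNat x0.toNat with hx | hx
    · rw [hx, List.getElem?_set_self hxrow]
      simp
    · rw [List.getElem?_set_ne (Ne.symm hx)]
      simp [hx]
  · rw [List.getElem?_set_ne (Ne.symm hy)]
    simp [hy]

-- ---- in-range water cells, adjacency, reachability ----

def pvInW (g : List (List String)) (n m x y : Int) : Prop :=
  0 ≤ x ∧ x < m ∧ 0 ≤ y ∧ y < n ∧ pvCell g y x = "W"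

def pvAdj (x y x' y' : Int) : Prop :=
  (x, y) ∈ [(x', y' + 1), (x' + 1, y'), (x' - 1, y'), (x', y' - 1)]

lemma pvInW_set {g : List (List String)} {n m x0 y0 : Int} (h : pvInW g n m x0 y0)
    (x y : Int) :
    pvInW (pvSetCell g y0 x0) n m x y ↔ pvInW g n m x y ∧ ¬(x = x0 ∧ y = y0) := by
  obtain ⟨hx0, hx0m, hy0, hy0n, hW⟩ := h
  unfold pvInW
  rw [pvCell_set hW]
  constructor
  · rintro ⟨h1, h2, h3, h4, h5⟩
    split_ifs at h5 with hc
    · exact absurd h5 (by decide)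
    · exact ⟨⟨h1, h2, h3, h4, h5⟩, fun ⟨ex, ey⟩ => hc (by omega)⟩
  · rintro ⟨⟨h1, h2, h3, h4, h5⟩, hne⟩
    refine ⟨h1, h2, h3, h4, ?_⟩
    rw [if_neg (fun ⟨ey, ex⟩ => hne (by omega))]
    exact h5

inductive pvReachQ (g : List (List String)) (n m : Int) (q : List (Int × Int)) :
    Int → Int → Prop
  | seed {x y : Int} : (x, y) ∈ q → pvInW g n m x y → pvReachQ g n m q x y
  | step {x y x' y' : Int} : pvReachQ g n m q x' y' → pvAdj x y x' y' →
      pvInW g n m x y → pvReachQ g n m q x y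

inductive pvReachB (g : List (List String)) (n m : Int) : Int → Int → Prop
  | border {x y : Int} : pvInW g n m x y → (x = 0 ∨ x = m - 1 ∨ y = 0 ∨ y = n - 1) →
      pvReachB g n m x y
  | step {x y x' y' : Int} : pvReachB g n m x' y' → pvAdj x y x' y' →
      pvInW g n m x y → pvReachB g n m x y

lemma pvReachQ_inW {g n m q x y} (h : pvReachQ g n m q x y) : pvInW g n m x y := by
  cases h <;> assumption

lemma pvReachB_inW {g n m x y} (h : pvReachB g n m x y) : pvInW g n m x y := by
  cases h <;> assumption

lemma pvReachQ_nil {g n m x y} : ¬ pvReachQ g n m [] x y := by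
  intro h
  induction h with
  | seed hm _ => simp at hm
  | step _ _ _ ih => exact ih

lemma pvReachQ_mono_q {g n m q q' x y} (hq : ∀ p ∈ q, p ∈ q')
    (h : pvReachQ g n m q x y) : pvReachQ g n m q' x y := by
  induction h with
  | seed hm hw => exact .seed (hq _ hm) hw
  | step _ ha hw ih => exact .step ih ha hw

lemma pvReachQ_cons_skip {g n m x0 y0 rest x y} (h0 : ¬ pvInW g n m x0 y0) :
    pvReachQ g n m ((x0, y0) :: rest) x y ↔ pvReachQ g n m rest x y := by
  constructor
  · intro h
    induction h with
    | seed hm hw =>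
      rcases List.mem_cons.1 hm with he | hm'
      · injection he with h1 h2
        subst h1; subst h2
        exact absurd hw h0
      · exact .seed hm' hw
    | step _ ha hw ih => exact .step ih ha hw
  · exact pvReachQ_mono_q (fun p hp => List.mem_cons_of_mem _ hp)

lemma pvReachQ_cons_pos {g : List (List String)} {n m x0 y0 : Int}
    {rest : List (Int × Int)} {x y : Int} (h0 : pvInW g n m x0 y0) :
    pvReachQ g n m ((x0, y0) :: rest) x y ↔
      ((x = x0 ∧ y = y0) ∨
        pvReachQ (pvSetCell g y0 x0) n m
          (rest ++ [(x0, y0 + 1), (x0 + 1, y0), (x0 - 1, y0), (x0, y0 - 1)]) x y) := by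
  constructor
  · intro h
    induction h with
    | @seed x y hm hw =>
      rcases List.mem_cons.1 hm with he | hm'
      · injection he with h1 h2; exact Or.inl ⟨h1, h2⟩
      · by_cases hc : x = x0 ∧ y = y0
        · exact Or.inl hc
        · exact Or.inr (.seed (List.mem_append_left _ hm') ((pvInW_set h0 x y).2 ⟨hw, hc⟩))
    | @step x y x' y' hr ha hw ih =>
      by_cases hc : x = x0 ∧ y = y0
      · exact Or.inl hc
      · right
        have hw' := (pvInW_set h0 x y).2 ⟨hw, hc⟩
        rcases ih with ⟨e1, e2⟩ | hr'
        · rw [e1, e2] at ha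
          exact .seed (List.mem_append_right _ ha) hw'
        · exact .step hr' ha hw'
  · rintro (⟨rfl, rfl⟩ | hr)
    · exact .seed (List.mem_cons_self ..) h0
    · induction hr with
      | @seed x y hm hw =>
        have hwg : pvInW g n m x y := ((pvInW_set h0 x y).1 hw).1
        rcases List.mem_append.1 hm with h1 | h2
        · exact .seed (List.mem_cons_of_mem _ h1) hwg
        · exact .step (.seed (List.mem_cons_self ..) h0) h2 hwg
      | @step x y x' y' hr' ha hw ih =>
        exact .step ih ha ((pvInW_set h0 x y).1 hw).1

-- ---- the 'W' count goes down at every productive step ----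

lemma count_set_W : ∀ (r : List String) (x : Nat), r.getD x "" = "W" →
    (r.set x "Traversed").count "W" + 1 = r.count "W" := by
  intro r
  induction r with
  | nil => intro x h; simp at h
  | cons a t ih =>
    intro x h
    cases x with
    | zero =>
      simp only [List.getD_cons_zero] at h
      subst h
      simp
    | succ k =>
      simp only [List.getD_cons_succ] at h
      have := ih k h
      simp only [List.set_cons_succ, List.count_cons]
      omega

lemma countW_set_nat : ∀ (g : List (List String)) (i j : Nat),
    (g.getD i []).getD j "" = "W" →
    ((g.set i ((g.getD i []).set j "Traversed")).map (fun r => r.count "W")).sum + 1 =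
      (g.map (fun r => r.count "W")).sum := by
  intro g
  induction g with
  | nil => intro i j h; simp at h
  | cons r t ih =>
    intro i j h
    cases i with
    | zero =>
      simp only [List.getD_cons_zero] at h ⊢
      simp only [List.set_cons_zero, List.map_cons, List.sum_cons]
      have := count_set_W r j h
      omega
    | succ k =>
      simp only [List.getD_cons_succ] at h ⊢
      simp only [List.set_cons_succ, List.map_cons, List.sum_cons]
      have := ih k j h
      omega

lemma pvCountW_set {g : List (List String)} {y x : Int} (h : pvCell g y x = "W") :
    pvCountW (pvSetCell g y x) + 1 = pvCountW g := by
  unfold pvCell at h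
  unfold pvCountW pvSetCell
  exact countW_set_nat g y.toNat x.toNat h

-- ---- characterisation of the BFS result ----

lemma pvBfs_shape (n m : Int) : ∀ (fuel : Nat) (g : List (List String))
    (q : List (Int × Int)),
    (pvBfs n m fuel g q).length = g.length ∧
      ∀ i : Nat, ((pvBfs n m fuel g q).getD i []).length = (g.getD i []).length := by
  intro fuel
  induction fuel with
  | zero => intro g q; exact ⟨rfl, fun _ => rfl⟩
  | succ f ih =>
    intro g q
    match q with
    | [] => exact ⟨rfl, fun _ => rfl⟩
    | (x, y) :: rest =>
      rw [pvBfs]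
      split
      · obtain ⟨h1, h2⟩ := ih (pvSetCell g y x)
          (rest ++ [(x, y + 1), (x + 1, y), (x - 1, y), (x, y - 1)])
        exact ⟨h1.trans (length_pvSetCell g y x),
          fun i => (h2 i).trans (rowLen_pvSetCell g y x i)⟩
      · exact ih g rest

lemma pvBfs_char (n m : Int) : ∀ (fuel : Nat) (g : List (List String))
    (q : List (Int × Int)), 5 * pvCountW g + q.length < fuel → ∀ x y : Int, 0 ≤ x → 0 ≤ y →
    (pvReachQ g n m q x y → pvCell (pvBfs n m fuel g q) y x = "Traversed") ∧
    (¬ pvReachQ g n m q x y → pvCell (pvBfs n m fuel g q) y x = pvCell g y x) := by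
  intro fuel
  induction fuel with
  | zero => intro g q hf; omega
  | succ f ih =>
    intro g q hf x y hx hy
    match q with
    | [] =>
      exact ⟨fun h => absurd h pvReachQ_nil, fun _ => rfl⟩
    | (x0, y0) :: rest =>
      rw [pvBfs]
      split
      case isTrue hc =>
        have h0 : pvInW g n m x0 y0 := hc
        have hW : pvCell g y0 x0 = "W" := hc.2.2.2.2
        have hcount := pvCountW_set hW
        have hf' : 5 * pvCountW (pvSetCell g y0 x0) +
            (rest ++ [(x0, y0 + 1), (x0 + 1, y0), (x0 - 1, y0), (x0, y0 - 1)]).length < f := by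
          simp only [List.length_append, List.length_cons, List.length_nil] at hf ⊢
          omega
        obtain ⟨ih1, ih2⟩ := ih _ _ hf' x y hx hy
        constructor
        · intro h
          rcases (pvReachQ_cons_pos h0).1 h with ⟨e1, e2⟩ | hr
          · subst e1; subst e2
            have hnr : ¬ pvReachQ (pvSetCell g y x) n m
                (rest ++ [(x, y + 1), (x + 1, y), (x - 1, y), (x, y - 1)]) x y := by
              intro hh
              have h2 := pvReachQ_inW hh
              rw [pvInW_set h0] at h2
              exact h2.2 ⟨rfl, rfl⟩
            rw [ih2 hnr, pvCell_set hW]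
            simp
          · exact ih1 hr
        · intro h
          have hne : ¬ (x = x0 ∧ y = y0) := by
            rintro ⟨rfl, rfl⟩
            exact h (.seed (List.mem_cons_self ..) h0)
          have hnr : ¬ pvReachQ (pvSetCell g y0 x0) n m
              (rest ++ [(x0, y0 + 1), (x0 + 1, y0), (x0 - 1, y0), (x0, y0 - 1)]) x y :=
            fun hh => h ((pvReachQ_cons_pos h0).2 (Or.inr hh))
          rw [ih2 hnr, pvCell_set hW, if_neg]
          rintro ⟨e1, e2⟩
          have hx0 := h0.1
          have hy0 := h0.2.2.1
          exact hne ⟨by omega, by omega⟩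
      case isFalse hc =>
        have hf' : 5 * pvCountW g + rest.length < f := by
          simp only [List.length_cons] at hf; omega
        obtain ⟨ih1, ih2⟩ := ih g rest hf' x y hx hy
        rw [pvReachQ_cons_skip hc]
        exact ⟨ih1, ih2⟩

-- ---- the two reachability notions coincide on the initial border queue ----

lemma mem_pvQ0 {n m x y : Int} :
    (x, y) ∈ pvQ0 n m ↔
      ((x = 0 ∨ x = m - 1) ∧ 0 ≤ y ∧ y < n) ∨ ((y = 0 ∨ y = n - 1) ∧ 0 ≤ x ∧ x < m) := by
  unfold pvQ0
  simp only [List.mem_append, List.mem_flatMap, PySem.List.mem_pyRange_one, List.mem_cons,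
    List.not_mem_nil, or_false, Prod.mk.injEq]
  constructor
  · rintro (⟨i, hi, (⟨rfl, rfl⟩ | ⟨rfl, rfl⟩)⟩ | ⟨i, hi, (⟨rfl, rfl⟩ | ⟨rfl, rfl⟩)⟩)
    · exact Or.inl ⟨Or.inl rfl, hi⟩
    · exact Or.inl ⟨Or.inr rfl, hi⟩
    · exact Or.inr ⟨Or.inl rfl, hi⟩
    · exact Or.inr ⟨Or.inr rfl, hi⟩
  · rintro (⟨(rfl | rfl), hy⟩ | ⟨(rfl | rfl), hx⟩)
    · exact Or.inl ⟨y, hy, Or.inl ⟨rfl, rfl⟩⟩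
    · exact Or.inl ⟨y, hy, Or.inr ⟨rfl, rfl⟩⟩
    · exact Or.inr ⟨x, hx, Or.inl ⟨rfl, rfl⟩⟩
    · exact Or.inr ⟨x, hx, Or.inr ⟨rfl, rfl⟩⟩

lemma reachQ_iff_reachB {g : List (List String)} {n m x y : Int} :
    pvReachQ g n m (pvQ0 n m) x y ↔ pvReachB g n m x y := by
  constructor
  · intro h
    induction h with
    | @seed x y hm hw =>
      refine .border hw ?_
      rcases mem_pvQ0.1 hm with ⟨hx, _⟩ | ⟨hy, _⟩
      · tauto
      · tauto
    | @step x y x' y' hr ha hw ih => exact .step ih ha hw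
  · intro h
    induction h with
    | @border x y hin hb =>
      refine .seed (mem_pvQ0.2 ?_) hin
      rcases hb with h | h | h | h
      · exact Or.inl ⟨Or.inl h, hin.2.2.1, hin.2.2.2.1⟩
      · exact Or.inl ⟨Or.inr h, hin.2.2.1, hin.2.2.2.1⟩
      · exact Or.inr ⟨Or.inl h, hin.1, hin.2.1⟩
      · exact Or.inr ⟨Or.inr h, hin.1, hin.2.1⟩
    | @step x y x' y' hr ha hin ih => exact .step ih ha hin

-- ---- B-side: walk, span and stack lemmas ----

lemma mem_pvStack0 {n m x y : Int} : (x, y) ∈ pvStack0 n m ↔ (x, y) ∈ pvQ0 n m := by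
  unfold pvStack0 pvQ0
  rw [List.mem_reverse]

lemma pvWalkL_spec (g : List (List String)) (y : Int) :
    ∀ (f : Nat) (l : Int), 0 ≤ l → l.toNat ≤ f →
      pvWalkL g y f l ≤ l ∧ 0 ≤ pvWalkL g y f l ∧
      (∀ t : Int, pvWalkL g y f l ≤ t → t < l → pvCell g y t = "W") ∧
      (0 < pvWalkL g y f l → pvCell g y (pvWalkL g y f l - 1) ≠ "W") := by
  intro f
  induction f with
  | zero =>
    intro l hl hf
    have hl0 : l = 0 := by omega
    subst hl0
    rw [pvWalkL]
    exact ⟨le_refl _, le_refl _, fun t h1 h2 => by omega, fun h => by omega⟩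
  | succ f ih =>
    intro l hl hf
    rw [pvWalkL]
    split
    case isTrue hc =>
      obtain ⟨h1, h2, h3, h4⟩ := ih (l - 1) (by omega) (by omega)
      refine ⟨by omega, h2, ?_, h4⟩
      intro t ht1 ht2
      rcases lt_or_ge t (l - 1) with h | h
      · exact h3 t ht1 h
      · have : t = l - 1 := by omega
        rw [this]
        exact hc.2
    case isFalse hc =>
      refine ⟨le_refl _, hl, fun t h1 h2 => by omega, ?_⟩
      intro hpos hW
      exact hc ⟨hpos, hW⟩

lemma pvWalkR_spec (g : List (List String)) (m y : Int) :
    ∀ (f : Nat) (r : Int), r < m → (m - 1 - r).toNat ≤ f →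
      r ≤ pvWalkR g m y f r ∧ pvWalkR g m y f r < m ∧
      (∀ t : Int, r < t → t ≤ pvWalkR g m y f r → pvCell g y t = "W") ∧
      (pvWalkR g m y f r < m - 1 → pvCell g y (pvWalkR g m y f r + 1) ≠ "W") := by
  intro f
  induction f with
  | zero =>
    intro r hr hf
    have hr0 : r = m - 1 := by omega
    rw [pvWalkR]
    exact ⟨le_refl _, by omega, fun t h1 h2 => by omega, fun h => by omega⟩
  | succ f ih =>
    intro r hr hf
    rw [pvWalkR]
    split
    case isTrue hc =>
      obtain ⟨h1, h2, h3, h4⟩ := ih (r + 1) (by omega) (by omega)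
      refine ⟨by omega, h2, ?_, h4⟩
      intro t ht1 ht2
      rcases lt_or_ge (r + 1) t with h | h
      · exact h3 t h ht2
      · have : t = r + 1 := by omega
        rw [this]
        exact hc.2
    case isFalse hc =>
      refine ⟨le_refl _, hr, fun t h1 h2 => by omega, ?_⟩
      intro hpos hW
      exact hc ⟨hpos, hW⟩

-- shape preservation of the span marking
lemma foldl_setCell_shape (y : Int) :
    ∀ (L : List Int) (g : List (List String)),
      ((L.foldl (fun h i => pvSetCell h y i) g).length = g.length) ∧
      ∀ i : Nat, (((L.foldl (fun h i => pvSetCell h y i) g).getD i []).length =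
        (g.getD i []).length) := by
  intro L
  induction L with
  | nil => intro g; exact ⟨rfl, fun _ => rfl⟩
  | cons a t ih =>
    intro g
    simp only [List.foldl_cons]
    obtain ⟨h1, h2⟩ := ih (pvSetCell g y a)
    exact ⟨h1.trans (length_pvSetCell g y a), fun i => (h2 i).trans (rowLen_pvSetCell g y a i)⟩

lemma pvMarkSpan_shape (g : List (List String)) (y l r : Int) :
    (pvMarkSpan g y l r).length = g.length ∧
      ∀ i : Nat, ((pvMarkSpan g y l r).getD i []).length = (g.getD i []).length := by
  unfold pvMarkSpan
  exact foldl_setCell_shape y _ g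

-- cell values after marking the span (all span cells are 'W' beforehand)
lemma pvMarkSpan_cell (g : List (List String)) (y l r : Int) (hy : 0 ≤ y) (hl : 0 ≤ l)
    (hrun : ∀ t : Int, l ≤ t → t ≤ r → pvCell g y t = "W") :
    ∀ a b : Int, 0 ≤ a → 0 ≤ b →
      pvCell (pvMarkSpan g y l r) b a =
        if b = y ∧ l ≤ a ∧ a ≤ r then "Traversed" else pvCell g b a := by
  intro a b ha hb
  have H : ∀ (d : Nat) (g : List (List String)) (l : Int), 0 ≤ l → (r + 1 - l).toNat = d →
      (∀ t : Int, l ≤ t → t ≤ r → pvCell g y t = "W") →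
      pvCell (pvMarkSpan g y l r) b a =
        if b = y ∧ l ≤ a ∧ a ≤ r then "Traversed" else pvCell g b a := by
    intro d
    induction d with
    | zero =>
      intro g l hl hd _hrun
      have hnil : pvMarkSpan g y l r = g := by
        unfold pvMarkSpan
        rw [PySem.List.pyRange_one_eq_nil (by omega)]
        rfl
      rw [hnil, if_neg (by omega)]
    | succ d ih =>
      intro g l hl hd hrun
      have hlW : pvCell g y l = "W" := hrun l le_rfl (by omega)
      have hstep : pvMarkSpan g y l r = pvMarkSpan (pvSetCell g y l) y (l + 1) r := by
        unfold pvMarkSpan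
        rw [PySem.List.pyRange_one_cons (by omega)]
        rw [List.foldl_cons]
      rw [hstep]
      have hrun' : ∀ t : Int, l + 1 ≤ t → t ≤ r → pvCell (pvSetCell g y l) y t = "W" := by
        intro t h1 h2
        rw [pvCell_set hlW, if_neg (by omega)]
        exact hrun t (by omega) h2
      rw [ih (pvSetCell g y l) (l + 1) (by omega) (by omega) hrun']
      by_cases hca : b = y ∧ l ≤ a ∧ a ≤ r
      · rw [if_pos hca]
        by_cases hge : l + 1 ≤ a
        · rw [if_pos ⟨hca.1, hge, hca.2.2⟩]
        · rw [if_neg (by omega), pvCell_set hlW, if_pos (by omega)]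
      · rw [if_neg hca, if_neg (by omega), pvCell_set hlW, if_neg (by omega)]
  exact H (r + 1 - l).toNat g l hl rfl hrun

-- the 'W' count drops by the span length
lemma pvMarkSpan_countW (g : List (List String)) (y l r : Int) (hl : 0 ≤ l)
    (hrun : ∀ t : Int, l ≤ t → t ≤ r → pvCell g y t = "W") :
    pvCountW (pvMarkSpan g y l r) + (r + 1 - l).toNat = pvCountW g := by
  have H : ∀ (d : Nat) (g : List (List String)) (l : Int), 0 ≤ l → (r + 1 - l).toNat = d →
      (∀ t : Int, l ≤ t → t ≤ r → pvCell g y t = "W") →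
      pvCountW (pvMarkSpan g y l r) + (r + 1 - l).toNat = pvCountW g := by
    intro d
    induction d with
    | zero =>
      intro g l hl hd _hrun
      have hnil : pvMarkSpan g y l r = g := by
        unfold pvMarkSpan
        rw [PySem.List.pyRange_one_eq_nil (by omega)]
        rfl
      rw [hnil]
      omega
    | succ d ih =>
      intro g l hl hd hrun
      have hlW : pvCell g y l = "W" := hrun l le_rfl (by omega)
      have hstep : pvMarkSpan g y l r = pvMarkSpan (pvSetCell g y l) y (l + 1) r := by
        unfold pvMarkSpan
        rw [PySem.List.pyRange_one_cons (by omega)]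
        rw [List.foldl_cons]
      rw [hstep]
      have hrun' : ∀ t : Int, l + 1 ≤ t → t ≤ r → pvCell (pvSetCell g y l) y t = "W" := by
        intro t h1 h2
        rw [pvCell_set hlW, if_neg (by omega)]
        exact hrun t (by omega) h2
      have h1 := ih (pvSetCell g y l) (l + 1) (by omega) (by omega) hrun'
      have h2 := pvCountW_set hlW
      omega
  exact H (r + 1 - l).toNat g l hl rfl hrun

lemma mem_pvPushes {y l r a b : Int} :
    (a, b) ∈ pvPushes y l r ↔ l ≤ a ∧ a ≤ r ∧ (b = y - 1 ∨ b = y + 1) := by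
  unfold pvPushes
  simp only [List.mem_reverse, List.mem_flatMap, PySem.List.mem_pyRange_one, List.mem_cons,
    List.not_mem_nil, or_false, Prod.mk.injEq]
  constructor
  · rintro ⟨i, hi, (⟨rfl, rfl⟩ | ⟨rfl, rfl⟩)⟩
    · exact ⟨hi.1, by omega, Or.inl rfl⟩
    · exact ⟨hi.1, by omega, Or.inr rfl⟩
  · rintro ⟨h1, h2, (rfl | rfl)⟩
    · exact ⟨a, ⟨h1, by omega⟩, Or.inl ⟨rfl, rfl⟩⟩
    · exact ⟨a, ⟨h1, by omega⟩, Or.inr ⟨rfl, rfl⟩⟩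

-- ---- reachability along the scanline process ----

-- a horizontal all-water run between two columns
def pvRun (g : List (List String)) (n m y a b : Int) : Prop :=
  ∀ t : Int, min a b ≤ t → t ≤ max a b → pvInW g n m t y

inductive pvReachS (g : List (List String)) (n m : Int) (st : List (Int × Int)) :
    Int → Int → Prop
  | seed {x y : Int} : (x, y) ∈ st → pvInW g n m x y → pvReachS g n m st x y
  | horiz {x y x' : Int} : pvReachS g n m st x' y → pvRun g n m y x x' → pvReachS g n m st x y
  | vert {x y y' : Int} : pvReachS g n m st x y' → (y = y' + 1 ∨ y = y' - 1) →
      pvInW g n m x y → pvReachS g n m st x y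

lemma pvReachS_inW {g n m st x y} (h : pvReachS g n m st x y) : pvInW g n m x y := by
  cases h with
  | seed _ hw => exact hw
  | horiz _ hr => exact hr x (by omega) (by omega)
  | vert _ _ hw => exact hw

lemma pvReachS_nil {g n m x y} : ¬ pvReachS g n m [] x y := by
  intro h
  induction h with
  | seed hm _ => simp at hm
  | horiz _ _ ih => exact ih
  | vert _ _ _ ih => exact ih

lemma pvReachS_cons_skip {g n m x0 y0 rest x y} (h0 : ¬ pvInW g n m x0 y0) :
    pvReachS g n m ((x0, y0) :: rest) x y ↔ pvReachS g n m rest x y := by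
  constructor
  · intro h
    induction h with
    | seed hm hw =>
      rcases List.mem_cons.1 hm with he | hm'
      · injection he with h1 h2
        subst h1; subst h2
        exact absurd hw h0
      · exact .seed hm' hw
    | horiz _ hr ih => exact .horiz ih hr
    | vert _ hv hw ih => exact .vert ih hv hw
  · intro h
    induction h with
    | seed hm hw => exact .seed (List.mem_cons_of_mem _ hm) hw
    | horiz _ hr ih => exact .horiz ih hr
    | vert _ hv hw ih => exact .vert ih hv hw

-- ---- pvReachS coincides with pvReachB (on the border stack) ----

lemma pvReachB_run {g : List (List String)} {n m y : Int} :
    ∀ (d : Nat) (x x' : Int), (x - x').natAbs = d → pvReachB g n m x' y →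
      pvRun g n m y x x' → pvReachB g n m x y := by
  intro d
  induction d with
  | zero =>
    intro x x' hd hb _hr
    have : x = x' := by omega
    rw [this]
    exact hb
  | succ d ih =>
    intro x x' hd hb hr
    rcases lt_or_ge x x' with hlt | hge
    · have hin : pvInW g n m (x' - 1) y := hr (x' - 1) (by omega) (by omega)
      have hstep : pvReachB g n m (x' - 1) y :=
        .step hb (by unfold pvAdj; simp) hin
      refine ih x (x' - 1) (by omega) hstep ?_
      intro t h1 h2
      exact hr t (by omega) (by omega)
    · have hgt : x' < x := by omega
      have hin : pvInW g n m (x' + 1) y := hr (x' + 1) (by omega) (by omega)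
      have hstep : pvReachB g n m (x' + 1) y :=
        .step hb (by unfold pvAdj; simp) hin
      refine ih x (x' + 1) (by omega) hstep ?_
      intro t h1 h2
      exact hr t (by omega) (by omega)

lemma reachS_stack0_iff_reachB {g : List (List String)} {n m x y : Int} :
    pvReachS g n m (pvStack0 n m) x y ↔ pvReachB g n m x y := by
  constructor
  · intro h
    induction h with
    | @seed x y hm hw =>
      refine .border hw ?_
      rcases mem_pvQ0.1 (mem_pvStack0.1 hm) with ⟨hx, _⟩ | ⟨hy, _⟩
      · tauto
      · tauto
    | @horiz x y x' _ hr ih => exact pvReachB_run (x - x').natAbs x x' rfl ih hr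
    | vert _ hv hw ih =>
      refine .step ih ?_ hw
      unfold pvAdj
      rcases hv with rfl | rfl <;> simp
  · intro h
    induction h with
    | @border x y hin hb =>
      refine .seed (mem_pvStack0.2 (mem_pvQ0.2 ?_)) hin
      rcases hb with h | h | h | h
      · exact Or.inl ⟨Or.inl h, hin.2.2.1, hin.2.2.2.1⟩
      · exact Or.inl ⟨Or.inr h, hin.2.2.1, hin.2.2.2.1⟩
      · exact Or.inr ⟨Or.inl h, hin.1, hin.2.1⟩
      · exact Or.inr ⟨Or.inr h, hin.1, hin.2.1⟩
    | @step x y x' y' hr ha hin ih =>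
      have ha' := ha
      simp only [pvAdj, List.mem_cons, List.not_mem_nil, or_false, Prod.mk.injEq] at ha'
      rcases ha' with ⟨rfl, rfl⟩ | ⟨rfl, rfl⟩ | ⟨rfl, rfl⟩ | ⟨rfl, rfl⟩
      · exact .vert ih (Or.inl rfl) hin
      · refine .horiz ih ?_
        intro t h1 h2
        have ht : t = x' + 1 ∨ t = x' := by omega
        rcases ht with rfl | rfl
        · exact hin
        · exact pvReachB_inW hr
      · refine .horiz ih ?_
        intro t h1 h2
        have ht : t = x' - 1 ∨ t = x' := by omega
        rcases ht with rfl | rfl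
        · exact hin
        · exact pvReachB_inW hr
      · exact .vert ih (Or.inr rfl) hin

-- ---- the span-marking transfer step ----

lemma pvInW_markSpan {g : List (List String)} {n m y l r : Int} (hy : 0 ≤ y) (hl : 0 ≤ l)
    (hrun : ∀ t : Int, l ≤ t → t ≤ r → pvCell g y t = "W") (a b : Int) :
    pvInW (pvMarkSpan g y l r) n m a b ↔
      pvInW g n m a b ∧ ¬(b = y ∧ l ≤ a ∧ a ≤ r) := by
  constructor
  · rintro ⟨h1, h2, h3, h4, h5⟩
    rw [pvMarkSpan_cell g y l r hy hl hrun a b h1 h3] at h5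
    split_ifs at h5 with hc
    · exact absurd h5 (by decide)
    · exact ⟨⟨h1, h2, h3, h4, h5⟩, hc⟩
  · rintro ⟨⟨h1, h2, h3, h4, h5⟩, hc⟩
    refine ⟨h1, h2, h3, h4, ?_⟩
    rw [pvMarkSpan_cell g y l r hy hl hrun a b h1 h3, if_neg hc]
    exact h5

lemma pvScan_transfer {g : List (List String)} {n m x y l r : Int}
    {rest : List (Int × Int)}
    (h0 : pvInW g n m x y) (hl0 : 0 ≤ l) (hlx : l ≤ x) (hxr : x ≤ r) (hrm : r < m)
    (hrun : ∀ t : Int, l ≤ t → t ≤ r → pvCell g y t = "W")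
    (hmaxl : 0 < l → pvCell g y (l - 1) ≠ "W")
    (hmaxr : r < m - 1 → pvCell g y (r + 1) ≠ "W") :
    ∀ a b : Int,
      pvReachS g n m ((x, y) :: rest) a b ↔
        ((b = y ∧ l ≤ a ∧ a ≤ r) ∨
          pvReachS (pvMarkSpan g y l r) n m (pvPushes y l r ++ rest) a b) := by
  have hy0 : 0 ≤ y := h0.2.2.1
  have hIW := pvInW_markSpan (g := g) (n := n) (m := m) hy0 hl0 hrun
  have hInWspan : ∀ t : Int, l ≤ t → t ≤ r → pvInW g n m t y := by
    intro t h1 h2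
    exact ⟨by omega, by omega, h0.2.2.1, h0.2.2.2.1, hrun t h1 h2⟩
  have hcont : ∀ a a' : Int, pvRun g n m y a a' → l ≤ a' → a' ≤ r → l ≤ a ∧ a ≤ r := by
    intro a a' hrn h1 h2
    by_contra hc
    rcases lt_or_ge a l with hal | har
    · have hin : pvInW g n m (l - 1) y := hrn (l - 1) (by omega) (by omega)
      exact hmaxl (by have := hin.1; omega) hin.2.2.2.2
    · have har' : r < a := by omega
      have hin : pvInW g n m (r + 1) y := hrn (r + 1) (by omega) (by omega)
      exact hmaxr (by have := hin.2.1; omega) hin.2.2.2.2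
  have span_reach : ∀ a : Int, l ≤ a → a ≤ r → pvReachS g n m ((x, y) :: rest) a y := by
    intro a h1 h2
    refine .horiz (.seed (List.mem_cons_self ..) h0) ?_
    intro t ht1 ht2
    exact hInWspan t (by omega) (by omega)
  intro a b
  constructor
  · intro h
    induction h with
    | @seed a b hm hw =>
      rcases List.mem_cons.1 hm with he | hm'
      · injection he with h1 h2
        subst h1; subst h2
        exact Or.inl ⟨rfl, hlx, hxr⟩
      · by_cases hsp : b = y ∧ l ≤ a ∧ a ≤ r
        · exact Or.inl hsp
        · exact Or.inr (.seed (List.mem_append_right _ hm') ((hIW a b).2 ⟨hw, hsp⟩))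
    | @horiz a b a' hr hrn ih =>
      by_cases hsp : b = y ∧ l ≤ a ∧ a ≤ r
      · exact Or.inl hsp
      · rcases ih with ⟨hb, h1, h2⟩ | hr'
        · subst hb
          exact absurd ⟨rfl, hcont a a' hrn h1 h2⟩ hsp
        · refine Or.inr (.horiz hr' ?_)
          intro t h1 h2
          refine (hIW t b).2 ⟨hrn t h1 h2, ?_⟩
          rintro ⟨rfl, ht1, ht2⟩
          refine hsp ⟨rfl, hcont a t ?_ ht1 ht2⟩
          intro u hu1 hu2
          exact hrn u (by omega) (by omega)
    | @vert a b b' hr hv hw ih =>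
      by_cases hsp : b = y ∧ l ≤ a ∧ a ≤ r
      · exact Or.inl hsp
      · rcases ih with ⟨hb, h1, h2⟩ | hr'
        · subst hb
          refine Or.inr (.seed (List.mem_append_left _ (mem_pvPushes.2 ⟨h1, h2, ?_⟩))
            ((hIW a b).2 ⟨hw, hsp⟩))
          tauto
        · exact Or.inr (.vert hr' hv ((hIW a b).2 ⟨hw, hsp⟩))
  · rintro (⟨rfl, h1, h2⟩ | h)
    · exact span_reach a h1 h2
    · induction h with
      | @seed a b hm hw =>
        have hwg : pvInW g n m a b := ((hIW a b).1 hw).1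
        rcases List.mem_append.1 hm with hp | hrest
        · obtain ⟨h1, h2, hb⟩ := mem_pvPushes.1 hp
          exact .vert (span_reach a h1 h2) (by tauto) hwg
        · exact .seed (List.mem_cons_of_mem _ hrest) hwg
      | @horiz a b a' hr hrn ih =>
        refine .horiz ih ?_
        intro t h1 h2
        exact ((hIW t b).1 (hrn t h1 h2)).1
      | @vert a b b' hr hv hw ih => exact .vert ih hv ((hIW a b).1 hw).1

-- ---- characterisation of the scan result ----

lemma length_pvPushes (y l r : Int) : (pvPushes y l r).length = 2 * (r + 1 - l).toNat := by
  unfold pvPushes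
  rw [List.length_reverse, List.length_flatMap]
  have h : ∀ L : List Int, (L.map (fun i => [(i, y - 1), (i, y + 1)].length)).sum = 2 * L.length := by
    intro L
    induction L with
    | nil => simp
    | cons a t ih =>
      rw [List.map_cons, List.sum_cons, ih, List.length_cons]
      simp only [List.length_cons, List.length_nil]
      omega
  rw [h, PySem.List.length_pyRange_one]

lemma pvScan_shape (n m : Int) : ∀ (fuel : Nat) (g : List (List String))
    (st : List (Int × Int)),
    (pvScan n m fuel g st).length = g.length ∧
      ∀ i : Nat, ((pvScan n m fuel g st).getD i []).length = (g.getD i []).length := by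
  intro fuel
  induction fuel with
  | zero => intro g st; exact ⟨rfl, fun _ => rfl⟩
  | succ f ih =>
    intro g st
    match st with
    | [] => exact ⟨rfl, fun _ => rfl⟩
    | (x, y) :: rest =>
      rw [pvScan]
      split
      · obtain ⟨h1, h2⟩ := ih (pvMarkSpan g y (pvWalkL g y x.toNat x)
          (pvWalkR g m y (m - 1 - x).toNat x))
          (pvPushes y (pvWalkL g y x.toNat x) (pvWalkR g m y (m - 1 - x).toNat x) ++ rest)
        obtain ⟨s1, s2⟩ := pvMarkSpan_shape g y (pvWalkL g y x.toNat x)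
          (pvWalkR g m y (m - 1 - x).toNat x)
        exact ⟨h1.trans s1, fun i => (h2 i).trans (s2 i)⟩
      · exact ih g rest

lemma pvScan_char (n m : Int) : ∀ (fuel : Nat) (g : List (List String))
    (st : List (Int × Int)), 3 * pvCountW g + st.length < fuel → ∀ x y : Int, 0 ≤ x → 0 ≤ y →
    (pvReachS g n m st x y → pvCell (pvScan n m fuel g st) y x = "Traversed") ∧
    (¬ pvReachS g n m st x y → pvCell (pvScan n m fuel g st) y x = pvCell g y x) := by
  intro fuel
  induction fuel with
  | zero => intro g st hf; omega
  | succ f ih =>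
    intro g st hf x y hx hy
    match st with
    | [] =>
      exact ⟨fun h => absurd h pvReachS_nil, fun _ => rfl⟩
    | (x0, y0) :: rest =>
      rw [pvScan]
      split
      case isTrue hc =>
        have h0 : pvInW g n m x0 y0 := ⟨hc.2.2.1, hc.2.2.2.1, hc.1, hc.2.1, hc.2.2.2.2⟩
        have hy00 : 0 ≤ y0 := hc.1
        obtain ⟨hlx, hl0, hlrun, hmaxl⟩ :=
          pvWalkL_spec g y0 x0.toNat x0 hc.2.2.1 (le_refl _)
        obtain ⟨hxr, hrm, hrrun, hmaxr⟩ :=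
          pvWalkR_spec g m y0 (m - 1 - x0).toNat x0 hc.2.2.2.1 (le_refl _)
        set l := pvWalkL g y0 x0.toNat x0 with hldef
        set r := pvWalkR g m y0 (m - 1 - x0).toNat x0 with hrdef
        have hrun : ∀ t : Int, l ≤ t → t ≤ r → pvCell g y0 t = "W" := by
          intro t h1 h2
          rcases lt_trichotomy t x0 with h | h | h
          · exact hlrun t h1 h
          · rw [h]; exact hc.2.2.2.2
          · exact hrrun t h h2
        have hcount := pvMarkSpan_countW g y0 l r hl0 hrun
        have hIW := pvInW_markSpan (g := g) (n := n) (m := m) hy00 hl0 hrun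
        have htr := pvScan_transfer (rest := rest) h0 hl0 hlx hxr hrm hrun hmaxl hmaxr
        have hk : 1 ≤ (r + 1 - l).toNat := by omega
        have hf' : 3 * pvCountW (pvMarkSpan g y0 l r) + (pvPushes y0 l r ++ rest).length < f := by
          rw [List.length_append, length_pvPushes]
          simp only [List.length_cons] at hf
          omega
        obtain ⟨ih1, ih2⟩ := ih _ _ hf' x y hx hy
        have hcellf := pvMarkSpan_cell g y0 l r hy00 hl0 hrun x y hx hy
        constructor
        · intro h
          rcases (htr x y).1 h with ⟨hb, h1, h2⟩ | hr
          · have hnr : ¬ pvReachS (pvMarkSpan g y0 l r) n m (pvPushes y0 l r ++ rest) x y := by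
              intro hh
              exact ((hIW x y).1 (pvReachS_inW hh)).2 ⟨hb, h1, h2⟩
            rw [ih2 hnr, hcellf, if_pos ⟨hb, h1, h2⟩]
          · exact ih1 hr
        · intro h
          have hnsp : ¬ (y = y0 ∧ l ≤ x ∧ x ≤ r) := fun hsp => h ((htr x y).2 (Or.inl hsp))
          have hnr : ¬ pvReachS (pvMarkSpan g y0 l r) n m (pvPushes y0 l r ++ rest) x y :=
            fun hh => h ((htr x y).2 (Or.inr hh))
          rw [ih2 hnr, hcellf, if_neg hnsp]
      case isFalse hc =>
        have h0 : ¬ pvInW g n m x0 y0 := by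
          intro hw
          exact hc ⟨hw.2.2.1, hw.2.2.2.1, hw.1, hw.2.1, hw.2.2.2.2⟩
        have hf' : 3 * pvCountW g + rest.length < f := by
          simp only [List.length_cons] at hf; omega
        obtain ⟨ih1, ih2⟩ := ih g rest hf' x y hx hy
        rw [pvReachS_cons_skip h0]
        exact ⟨ih1, ih2⟩

-- ---- assembling both outputs cell by cell ----

lemma pvCell_eq_getElem {g : List (List String)} {i j : Nat} (hi : i < g.length)
    (hj : j < g[i].length) : pvCell g (i : Int) (j : Int) = g[i][j] := by
  unfold pvCell
  simp only [Int.toNat_natCast]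
  rw [List.getD_eq_getElem g [] hi, List.getD_eq_getElem _ _ hj]

lemma compute_enclosed_eq_alt (A : List (List String)) :
    compute_enclosed A = compute_enclosed_alt A := by
  have hL : compute_enclosed A =
      (pvBfs (A.length : Int) ((A.getD 0 []).length : Int)
        (5 * pvCountW A + (pvQ0 (A.length : Int) ((A.getD 0 []).length : Int)).length + 1)
        A (pvQ0 (A.length : Int) ((A.getD 0 []).length : Int))).map
        (fun row => row.map (fun e => if e = "Traversed" then "W" else "B")) := rfl
  have hR : compute_enclosed_alt A =
      (pvScan (A.length : Int) ((A.getD 0 []).length : Int)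
        (3 * pvCountW A + (pvStack0 (A.length : Int) ((A.getD 0 []).length : Int)).length + 1)
        A (pvStack0 (A.length : Int) ((A.getD 0 []).length : Int))).map
        (fun row => row.map (fun e => if e = "Traversed" then "W" else "B")) := rfl
  rw [hL, hR]
  set n : Int := (A.length : Int) with hn
  set m : Int := ((A.getD 0 []).length : Int) with hm
  set G := pvBfs n m (5 * pvCountW A + (pvQ0 n m).length + 1) A (pvQ0 n m) with hG
  set S := pvScan n m (3 * pvCountW A + (pvStack0 n m).length + 1) A (pvStack0 n m) with hS
  have hshapeA := pvBfs_shape n m (5 * pvCountW A + (pvQ0 n m).length + 1) A (pvQ0 n m)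
  have hcharA := pvBfs_char n m (5 * pvCountW A + (pvQ0 n m).length + 1) A (pvQ0 n m)
    (by omega)
  have hshapeB := pvScan_shape n m (3 * pvCountW A + (pvStack0 n m).length + 1) A (pvStack0 n m)
  have hcharB := pvScan_char n m (3 * pvCountW A + (pvStack0 n m).length + 1) A (pvStack0 n m)
    (by omega)
  have hGlen : G.length = A.length := hshapeA.1
  have hSlen : S.length = A.length := hshapeB.1
  have hrowA : ∀ (i : Nat), i < A.length → ∀ (hi : i < G.length), G[i].length = A[i].length := by
    intro i hiA hiG
    have := hshapeA.2 i
    rwa [List.getD_eq_getElem G [] hiG, List.getD_eq_getElem A [] hiA] at this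
  have hrowB : ∀ (i : Nat), i < A.length → ∀ (hi : i < S.length), S[i].length = A[i].length := by
    intro i hiA hiS
    have := hshapeB.2 i
    rwa [List.getD_eq_getElem S [] hiS, List.getD_eq_getElem A [] hiA] at this
  apply List.ext_getElem
  · simp [hGlen, hSlen]
  · intro i h1 h2
    rw [List.length_map, hGlen] at h1
    have hiG : i < G.length := by rw [hGlen]; exact h1
    have hiS : i < S.length := by rw [hSlen]; exact h1
    simp only [List.getElem_map]
    apply List.ext_getElem
    · simp [hrowA i h1 hiG, hrowB i h1 hiS]
    · intro j hj1 hj2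
      rw [List.length_map] at hj1 hj2
      rw [hrowA i h1 hiG] at hj1
      simp only [List.getElem_map]
      have hjG : j < G[i].length := by rw [hrowA i h1 hiG]; exact hj1
      have hjS : j < S[i].length := by rw [hrowB i h1 hiS]; exact hj1
      have hcellG : G[i][j] = pvCell G (i : Int) (j : Int) :=
        (pvCell_eq_getElem hiG hjG).symm
      have hcellS : S[i][j] = pvCell S (i : Int) (j : Int) :=
        (pvCell_eq_getElem hiS hjS).symm
      obtain ⟨hA1, hA2⟩ := hcharA (j : Int) (i : Int) (Int.natCast_nonneg j)
        (Int.natCast_nonneg i)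
      obtain ⟨hB1, hB2⟩ := hcharB (j : Int) (i : Int) (Int.natCast_nonneg j)
        (Int.natCast_nonneg i)
      by_cases hreach : pvReachQ A n m (pvQ0 n m) (j : Int) (i : Int)
      · have hreachS : pvReachS A n m (pvStack0 n m) (j : Int) (i : Int) :=
          reachS_stack0_iff_reachB.2 (reachQ_iff_reachB.1 hreach)
        rw [hcellG, hcellS, hA1 hreach, hB1 hreachS]
      · have hreachS : ¬ pvReachS A n m (pvStack0 n m) (j : Int) (i : Int) :=
          fun h => hreach (reachQ_iff_reachB.2 (reachS_stack0_iff_reachB.1 h))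
        rw [hcellG, hcellS, hA2 hreach, hB2 hreachS]

-- ===== VERDICT (by name: the statement is the Claim_ definition above) =====
theorem compute_enclosed_spec : Claim_equal_compute_enclosed := by
  intro A _hDom _hPre
  exact compute_enclosed_eq_alt A
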